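-- pv_equiv track=rewrite | github.com/Disi77/Advent-of-Code | AdventOfCode2020/day24/day24_part1.py | get_coordinates_of_tile
-- ===== SOURCE A (Python) =====
-- def get_coordinates_of_tile(line):
--     r"""     if A row is even
--        / \ / \
--       | * | * |       (-1, 1)     (0, 1)
--      / \ / \ / \
--     | * | A | * |   (-1, 0)  (0, 0)  (1, 0)
--      \ / \ / \ /
--       | * | * |       (-1, -1)    (0, -1)
--        \ / \ /
--
--               if B row is odd
--        / \ / \
--       | * | * |       (0, 1)     (1, 1)
--      / \ / \ / \
--     | * | B | * |   (-1, 0)  (0, 0)  (1, 0)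
--      \ / \ / \ /
--       | * | * |       (0, -1)    (1, -1)
--        \ / \ /
--     """
--
--     DIR_ROW_EVEN = {"nw": (-1, 1),
--                     "w": (-1, 0),
--                     "sw": (-1, -1),
--                     "ne": (0, 1),
--                     "e": (1, 0),
--                     "se": (0, -1)}
--
--     DIR_ROW_ODD = {"nw": (0, 1),
--                    "w": (-1, 0),
--                    "sw": (0, -1),
--                    "ne": (1, 1),
--                    "e": (1, 0),
--                    "se": (1, -1)}
--
--     line = line.strip()
--     x = y = index = 0
--     while index < len(line):
--         dir = line[index]
--         if dir not in DIR_ROW_EVEN: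
--             dir = line[index:index+2]
--             index += 1
--         index += 1
--         if y % 2 == 0:
--             x += DIR_ROW_EVEN[dir][0]
--             y += DIR_ROW_EVEN[dir][1]
--         else:
--             x += DIR_ROW_ODD[dir][0]
--             y += DIR_ROW_ODD[dir][1]
--     return (x, y)
-- ===== SOURCE B (Python) =====
-- def get_coordinates_of_tile(line):
--     # parity-free cube/axial accumulation; convert to A's offset coords at the end
--     DELTAS = {"e": (1, 0), "w": (-1, 0),
--               "ne": (1, -1), "nw": (0, -1),
--               "se": (0, 1), "sw": (-1, 1)}
--     line = line.strip()
--     cx = cz = 0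
--     i = 0
--     while i < len(line):
--         tok = line[i]
--         if tok not in ("e", "w"):
--             tok = line[i:i+2]
--             i += 1
--         i += 1
--         dx, dz = DELTAS[tok]
--         cx += dx
--         cz += dz
--     return (cx + cz // 2, -cz)
-- ===== Notes on version B (the rewrite author's own statement) =====
-- stated objective: alternative
-- what changed: B accumulates the walk in axial/cube hex coordinates with a single parity-independent delta table (no branching on row parity per step) and converts once at the end via (cx + cz//2, -cz), instead of A's two parity-dependent offset tables consulted on every step.
import Mathlib
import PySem

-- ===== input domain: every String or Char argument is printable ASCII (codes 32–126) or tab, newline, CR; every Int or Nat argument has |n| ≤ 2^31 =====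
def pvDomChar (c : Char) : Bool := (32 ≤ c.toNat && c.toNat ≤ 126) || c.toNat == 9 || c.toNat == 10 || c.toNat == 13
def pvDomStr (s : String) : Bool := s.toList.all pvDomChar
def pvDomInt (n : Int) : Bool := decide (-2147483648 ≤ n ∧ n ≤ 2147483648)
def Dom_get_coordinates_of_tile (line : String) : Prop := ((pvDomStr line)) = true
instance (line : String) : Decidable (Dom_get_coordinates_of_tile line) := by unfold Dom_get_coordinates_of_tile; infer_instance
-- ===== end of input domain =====

-- B replaces A's two parity-dependent offset-coordinate tables with one parity-free
-- axial/cube delta table and a single final conversion back to offset coordinates.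

-- ===== PORT A =====
def pvDirEven : PySem.Dict String (Int × Int) :=
  PySem.Dict.mk [("nw", (-1, 1)), ("w", (-1, 0)), ("sw", (-1, -1)),
                 ("ne", (0, 1)), ("e", (1, 0)), ("se", (0, -1))]

def pvDirOdd : PySem.Dict String (Int × Int) :=
  PySem.Dict.mk [("nw", (0, 1)), ("w", (-1, 0)), ("sw", (0, -1)),
                 ("ne", (1, 1)), ("e", (1, 0)), ("se", (1, -1))]

-- the while loop of A: state (x, y), index walks the chars; KeyError → delta (0,0) (excluded by Pre_)
def pvLoopA : List Char → Int → Int → Int × Int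
  | [], x, y => (x, y)
  | c :: rest, x, y =>
    if (pvDirEven.get? (String.ofList [c])).isSome then
      let d := if PySem.Int.mod y 2 == 0 then (pvDirEven.get? (String.ofList [c])).getD (0, 0)
               else (pvDirOdd.get? (String.ofList [c])).getD (0, 0)
      pvLoopA rest (x + d.1) (y + d.2)
    else
      let tok := String.ofList (c :: rest.take 1)   -- line[index:index+2]
      let d := if PySem.Int.mod y 2 == 0 then (pvDirEven.get? tok).getD (0, 0)
               else (pvDirOdd.get? tok).getD (0, 0)
      pvLoopA (rest.drop 1) (x + d.1) (y + d.2)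
  termination_by cs _ _ => cs.length
  decreasing_by all_goals simp

def get_coordinates_of_tile (line : String) : Int × Int :=
  pvLoopA (PySem.Str.strip line).toList 0 0

-- ===== PORT B =====
def pvDeltas : PySem.Dict String (Int × Int) :=
  PySem.Dict.mk [("e", (1, 0)), ("w", (-1, 0)), ("ne", (1, -1)),
                 ("nw", (0, -1)), ("se", (0, 1)), ("sw", (-1, 1))]

-- B's while loop: state (cx, cz) in cube coords, no parity branch
def pvLoopB : List Char → Int → Int → Int × Int
  | [], cx, cz => (cx, cz)
  | c :: rest, cx, cz =>
    if c = 'e' ∨ c = 'w' then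
      let d := (pvDeltas.get? (String.ofList [c])).getD (0, 0)
      pvLoopB rest (cx + d.1) (cz + d.2)
    else
      let d := (pvDeltas.get? (String.ofList (c :: rest.take 1))).getD (0, 0)
      pvLoopB (rest.drop 1) (cx + d.1) (cz + d.2)
  termination_by cs _ _ => cs.length
  decreasing_by all_goals simp

def get_coordinates_of_tile_alt (line : String) : Int × Int :=
  let p := pvLoopB (PySem.Str.strip line).toList 0 0
  (p.1 + PySem.Int.floordiv p.2 2, -p.2)

-- ===== PRECONDITION & SPEC =====
-- token grammar: the stripped line is a concatenation of e, w, ne, nw, se, sw, read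
-- greedily (one char unless it is not e/w, then two); anything else makes A raise KeyError.
def pvValidTok : List Char → Bool
  | [] => true
  | c :: rest =>
    if c = 'e' ∨ c = 'w' then pvValidTok rest
    else
      match rest with
      | [] => false
      | d :: rest' =>
        decide (String.ofList [c, d] ∈ (["nw", "sw", "ne", "se"] : List String)) && pvValidTok rest'

-- Pre_ excludes exactly the lines on which Python A raises KeyError (malformed direction tokens)
def Pre_get_coordinates_of_tile (line : String) : Prop :=
  pvValidTok (PySem.Str.strip line).toList = true
instance (line : String) : Decidable (Pre_get_coordinates_of_tile line) := by
  unfold Pre_get_coordinates_of_tile; infer_instance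

def pvWitness_get_coordinates_of_tile : String := ""

def Spec_get_coordinates_of_tile (line : String) (out : Int × Int) : Prop :=
  out = get_coordinates_of_tile_alt line
instance (line : String) (out : Int × Int) : Decidable (Spec_get_coordinates_of_tile line out) := by
  unfold Spec_get_coordinates_of_tile; infer_instance

-- ===== CLAIM (what is proved, stated in full; the proofs are below) =====
def Claim_equal_get_coordinates_of_tile : Prop :=
  ∀ (line : String), Dom_get_coordinates_of_tile line →
    Pre_get_coordinates_of_tile line →
    Spec_get_coordinates_of_tile line (get_coordinates_of_tile line)

-- ===== LEMMAS AND PROOFS =====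



-- the loop invariant: A's offset state (x, y) corresponds to B's cube state (cx, cz)
-- via x = cx + cz // 2, y = -cz
lemma pvLoop_rel : ∀ (cs : List Char) (cx cz : Int), pvValidTok cs = true →
    pvLoopA cs (cx + PySem.Int.floordiv cz 2) (-cz) =
      ((pvLoopB cs cx cz).1 + PySem.Int.floordiv (pvLoopB cs cx cz).2 2,
       -(pvLoopB cs cx cz).2) := by
  intro cs
  induction cs using pvValidTok.induct with
  | case1 => intro cx cz _; simp [pvLoopA, pvLoopB]
  | case2 c rest hc ih =>
    intro cx cz h
    rcases hc with rfl | rfl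
    · rw [pvValidTok.eq_def] at h; simp at h
      rw [pvLoopA, pvLoopB]
      simp [pvDirEven, pvDirOdd, pvDeltas, PySem.Dict.get?]
      have H := ih (cx + 1) cz h
      simp at H
      rw [show cx + cz / 2 + 1 = cx + 1 + cz / 2 by ring]
      exact H
    · rw [pvValidTok.eq_def] at h; simp at h
      rw [pvLoopA, pvLoopB]
      simp [pvDirEven, pvDirOdd, pvDeltas, PySem.Dict.get?]
      have H := ih (cx + (-1)) cz h
      simp at H
      rw [show cx + cz / 2 + -1 = cx + -1 + cz / 2 by ring]
      exact H
  | case3 c hc => intro cx cz h; rw [pvValidTok.eq_def] at h; simp [hc] at h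
  | case4 c hc d rest' ih =>
    intro cx cz h
    rw [pvValidTok.eq_def] at h
    simp [hc] at h
    obtain ⟨htok, hrest⟩ := h
    rcases htok with h' | h' | h' | h' <;>
      · have hl := congrArg String.toList h'
        simp at hl
        obtain ⟨rfl, rfl⟩ := hl
        rw [pvLoopA, pvLoopB]
        simp [pvDirEven, pvDirOdd, pvDeltas, PySem.Dict.get?]
        by_cases hp : (2 : Int) ∣ cz <;>
          · simp [hp]
            first
              | (have H := ih cx (cz + (-1)) hrest; simp at H; convert H using 2 <;> omega)
              | (have H := ih (cx + (-1)) (cz + 1) hrest; simp at H; convert H using 2 <;> omega)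
              | (have H := ih (cx + 1) (cz + (-1)) hrest; simp at H; convert H using 2 <;> omega)
              | (have H := ih cx (cz + 1) hrest; simp at H; convert H using 2 <;> omega)

theorem get_coordinates_of_tile_spec : Claim_equal_get_coordinates_of_tile := by
  intro line _ hpre
  unfold Spec_get_coordinates_of_tile get_coordinates_of_tile get_coordinates_of_tile_alt
  have := pvLoop_rel (PySem.Str.strip line).toList 0 0 hpre
  simpa [PySem.Int.floordiv] using this
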